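-- pv_equiv track=rewrite | github.com/uhl-solutions/MINE | tests/test_doc_claims.py | _parse_doc_lines
-- ===== SOURCE A (Python) =====
-- def _parse_doc_lines(content: str):
--     """Parse doc content, yielding (line_num, line, in_code_fence) tuples.
--
--     Tracks fenced code blocks to avoid parsing code examples as real content.
--     """
--     in_code_fence = False
--     for line_num, line in enumerate(content.split("\n"), 1):
--         # Toggle code fence state on fenced code blocks (``` or ~~~)
--         if line.strip().startswith("```") or line.strip().startswith("~~~"):
--             in_code_fence = not in_code_fence
--             yield (line_num, line, True)  # The fence line itself is "in code"
--         else: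
--             yield (line_num, line, in_code_fence)
-- ===== SOURCE B (Python) =====
-- from itertools import accumulate
--
-- def _parse_doc_lines(content: str):
--     lines = content.split("\n")
--     fence = [line.strip().startswith(("```", "~~~")) for line in lines]
--     counts = list(accumulate(int(f) for f in fence))
--     for i, (line, f, c) in enumerate(zip(lines, fence, counts), 1):
--         yield (i, line, True if f else c % 2 == 1)
-- ===== Notes on version B (the rewrite author's own statement) =====
-- stated objective: alternative
-- what changed: Replaces the stateful toggle loop by a three-pass pipeline: a fence-flag list, an itertools.accumulate prefix-count, then one zip that derives each line's in-fence flag from the prefix parity.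
import Mathlib
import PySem

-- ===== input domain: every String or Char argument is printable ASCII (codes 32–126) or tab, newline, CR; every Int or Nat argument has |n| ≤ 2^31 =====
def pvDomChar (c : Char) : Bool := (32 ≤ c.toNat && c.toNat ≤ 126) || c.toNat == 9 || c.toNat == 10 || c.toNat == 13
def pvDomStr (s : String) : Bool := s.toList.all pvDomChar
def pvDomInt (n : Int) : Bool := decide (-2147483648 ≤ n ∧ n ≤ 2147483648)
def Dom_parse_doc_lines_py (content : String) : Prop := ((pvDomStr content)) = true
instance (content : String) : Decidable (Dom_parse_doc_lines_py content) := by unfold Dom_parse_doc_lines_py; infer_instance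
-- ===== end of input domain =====

-- B replaces A's stateful fence-toggle loop by a fence-flag list, a prefix-count pass,
-- and a zip deriving each flag from prefix parity (alternative decomposition, same cost).


-- ===== PORT A =====
-- line.strip().startswith("```") or line.strip().startswith("~~~")
def pvIsFence (line : String) : Bool :=
  PySem.Str.startswith (PySem.Str.strip line) "```" || PySem.Str.startswith (PySem.Str.strip line) "~~~"

-- the generator loop of A: line number, current in_code_fence state, remaining lines
def pvGoA (i : Int) (inFence : Bool) : List String → List (Int × String × Bool)
  | [] => []
  | line :: rest =>
    if pvIsFence line then (i, line, true) :: pvGoA (i + 1) (!inFence) rest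
    else (i, line, inFence) :: pvGoA (i + 1) inFence rest

def parse_doc_lines_py (content : String) : List (Int × String × Bool) :=
  pvGoA 1 false ((PySem.Str.split? content "\n").getD [])

-- ===== PORT B =====
-- itertools.accumulate of the 0/1 fence flags (inclusive running counts)
def pvAccum (c : Nat) : List Bool → List Nat
  | [] => []
  | b :: bs => (c + if b then 1 else 0) :: pvAccum (c + if b then 1 else 0) bs

-- the final enumerate-zip loop of B
def pvGoB (i : Int) : List (String × Bool × Nat) → List (Int × String × Bool)
  | [] => []
  | (line, f, c) :: rest => (i, line, if f then true else c % 2 == 1) :: pvGoB (i + 1) rest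

def parse_doc_lines_py_alt (content : String) : List (Int × String × Bool) :=
  let lines : List String := (PySem.Str.split? content "\n").getD []
  let fence : List Bool := lines.map pvIsFence
  let counts : List Nat := pvAccum 0 fence
  pvGoB 1 (List.zip lines (List.zip fence counts))

-- ===== PRECONDITION & SPEC =====
def Spec_parse_doc_lines_py (content : String) (out : List (Int × String × Bool)) : Prop := out = parse_doc_lines_py_alt content
instance (content : String) (out : List (Int × String × Bool)) : Decidable (Spec_parse_doc_lines_py content out) := by unfold Spec_parse_doc_lines_py; infer_instance

-- ===== CLAIM (what is proved, stated in full; the proofs are below) =====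
def Claim_equal_parse_doc_lines_py : Prop := ∀ (content : String), Dom_parse_doc_lines_py content → Spec_parse_doc_lines_py content (parse_doc_lines_py content)

-- ===== LEMMAS AND PROOFS =====

lemma pv_not_parity (c : Nat) : (!(c % 2 == 1)) = ((c + 1) % 2 == 1) := by
  rcases Nat.mod_two_eq_zero_or_one c with h | h <;> simp [h, Nat.add_mod]

lemma pv_key (ls : List String) (i : Int) (c : Nat) :
    pvGoA i (c % 2 == 1) ls = pvGoB i (ls.zip ((ls.map pvIsFence).zip (pvAccum c (ls.map pvIsFence)))) := by
  induction ls generalizing i c with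
  | nil => rfl
  | cons line rest ih =>
    simp only [List.map, pvAccum, List.zip_cons_cons, pvGoA, pvGoB]
    by_cases h : pvIsFence line = true
    · simp only [h, if_true]
      rw [pv_not_parity c, ih]
    · simp only [h, Bool.false_eq_true, if_false, Nat.add_zero]
      rw [ih]

-- ===== VERDICT (by name: the statement is the Claim_ definition above) =====
theorem parse_doc_lines_py_spec : Claim_equal_parse_doc_lines_py := by
  intro content _
  unfold Spec_parse_doc_lines_py parse_doc_lines_py parse_doc_lines_py_alt
  exact pv_key _ 1 0
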